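-- pv_equiv track=rewrite | github.com/lachlanmcintosh/PRISMM | prismm/run_simulation/simulated_tree_analysis/count_multiplicities.py | count_copy_numbers
-- ===== SOURCE A (Python) =====
-- from typing import Dict, List, Tuple
--
-- def count_copy_numbers(simulated_chromosomes: Dict[str, List[Dict]]) -> Dict[str, List[int]]:
--     """
--     Count the number of each parental specific copy number found in the genome.
--     """
--     observed_copy_numbers = {}
--     for chrom_type in simulated_chromosomes:
--         observed_copy_numbers[chrom_type] = [
--             len([x for x in simulated_chromosomes[chrom_type] if paternal == x["paternal"] and not x["dead"]])
--             for paternal in [True, False]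
--         ]
--     return observed_copy_numbers
-- ===== SOURCE B (Python) =====
-- def count_copy_numbers(simulated_chromosomes):
--     """
--     Count the number of each parental specific copy number found in the genome.
--     Single pass per chromosome type maintaining both counters at once.
--     """
--     observed_copy_numbers = {}
--     for chrom_type, chroms in simulated_chromosomes.items():
--         counts = [0, 0]
--         for x in chroms:
--             if x["dead"]:
--                 continue
--             if x["paternal"]:
--                 counts[0] += 1
--             else:
--                 counts[1] += 1
--         observed_copy_numbers[chrom_type] = counts
--     return observed_copy_numbers
-- ===== Notes on version B (the rewrite author's own statement) =====
-- stated objective: simpler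
-- what changed: Replaces A's two filtered list-comprehension scans per chromosome type with a single explicit pass that maintains both the paternal and maternal counters at once; Pre_ excludes inputs where A raises KeyError (an entry missing the 'paternal' or 'dead' key) and assoc lists with duplicate outer keys, which cannot arise from a Python dict.
import Mathlib
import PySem

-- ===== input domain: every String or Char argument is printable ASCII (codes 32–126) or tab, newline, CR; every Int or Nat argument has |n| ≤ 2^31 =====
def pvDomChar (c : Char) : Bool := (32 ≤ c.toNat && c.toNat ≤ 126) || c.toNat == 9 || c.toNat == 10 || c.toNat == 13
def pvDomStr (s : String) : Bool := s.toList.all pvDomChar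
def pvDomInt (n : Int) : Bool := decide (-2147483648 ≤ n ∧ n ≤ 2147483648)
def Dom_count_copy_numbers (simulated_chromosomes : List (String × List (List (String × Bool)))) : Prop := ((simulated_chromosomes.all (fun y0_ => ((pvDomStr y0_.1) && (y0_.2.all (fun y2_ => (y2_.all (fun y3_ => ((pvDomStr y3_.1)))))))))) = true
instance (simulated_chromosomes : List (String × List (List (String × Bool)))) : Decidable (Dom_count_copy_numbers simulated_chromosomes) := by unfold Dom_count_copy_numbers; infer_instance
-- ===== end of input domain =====

-- B merges A's two filtered comprehension scans into one pass per chromosome type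
-- maintaining both counters at once (objective: simpler/alternative; not claimed faster).

-- ===== PORT A =====
-- x["paternal"] / x["dead"]: Python raises KeyError on a missing key; under Pre_ both keys
-- are present in every entry, so the .getD default below is never the returned lookup value.
def cnGet (x : List (String × Bool)) (k : String) : Bool :=
  (PySem.Dict.get? (PySem.Dict.mk x) k).getD false

def count_copy_numbers (simulated_chromosomes : List (String × List (List (String × Bool)))) : List (String × List Int) :=
  (simulated_chromosomes.foldl
    (fun (acc : PySem.Dict String (List Int)) p =>
      acc.insert p.1
        ([true, false].map (fun paternal =>
          ((((PySem.Dict.get? (PySem.Dict.mk simulated_chromosomes) p.1).getD []).filter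
              (fun x => (paternal == cnGet x "paternal") && !(cnGet x "dead"))).length : Int))))
    PySem.Dict.empty).items

-- ===== PORT B =====
def cnAltCounts (chroms : List (List (String × Bool))) : List Int :=
  (chroms.foldl
    (fun (counts : Int × Int) x =>
      if cnGet x "dead" then counts
      else if cnGet x "paternal" then (counts.1 + 1, counts.2)
      else (counts.1, counts.2 + 1))
    (0, 0)) |> (fun c => [c.1, c.2])

def count_copy_numbers_alt (simulated_chromosomes : List (String × List (List (String × Bool)))) : List (String × List Int) :=
  (simulated_chromosomes.foldl
    (fun (acc : PySem.Dict String (List Int)) p => acc.insert p.1 (cnAltCounts p.2))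
    PySem.Dict.empty).items

-- ===== PRECONDITION & SPEC =====
-- Pre_ excludes inputs on which A raises KeyError (an entry missing the "paternal" or "dead"
-- key) and assoc lists with duplicate outer keys, which cannot arise from a Python dict.
def Pre_count_copy_numbers (simulated_chromosomes : List (String × List (List (String × Bool)))) : Prop :=
  (simulated_chromosomes.map Prod.fst).Nodup ∧
  ∀ p ∈ simulated_chromosomes, ∀ x ∈ p.2,
    "paternal" ∈ x.map Prod.fst ∧ "dead" ∈ x.map Prod.fst
instance (simulated_chromosomes : List (String × List (List (String × Bool)))) : Decidable (Pre_count_copy_numbers simulated_chromosomes) := by unfold Pre_count_copy_numbers; infer_instance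

def pvWitness_count_copy_numbers : (List (String × List (List (String × Bool)))) :=
  [("chr1", [[("paternal", true), ("dead", false)], [("paternal", false), ("dead", true)]]),
   ("chr2", [])]

def Spec_count_copy_numbers (simulated_chromosomes : List (String × List (List (String × Bool)))) (out : List (String × List Int)) : Prop := out = count_copy_numbers_alt simulated_chromosomes
instance (simulated_chromosomes : List (String × List (List (String × Bool)))) (out : List (String × List Int)) : Decidable (Spec_count_copy_numbers simulated_chromosomes out) := by unfold Spec_count_copy_numbers; infer_instance

-- ===== CLAIM (what is proved, stated in full; the proofs are below) =====
def Claim_equal_count_copy_numbers : Prop := ∀ (simulated_chromosomes : List (String × List (List (String × Bool)))), Dom_count_copy_numbers simulated_chromosomes → Pre_count_copy_numbers simulated_chromosomes → Spec_count_copy_numbers simulated_chromosomes (count_copy_numbers simulated_chromosomes)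

-- ===== LEMMAS AND PROOFS =====

-- per-type counts agree: A's two filtered lengths equal B's one-pass pair of counters
lemma cnAlt_fold (chroms : List (List (String × Bool))) (a b : Int) :
    chroms.foldl
      (fun (counts : Int × Int) x =>
        if cnGet x "dead" then counts
        else if cnGet x "paternal" then (counts.1 + 1, counts.2)
        else (counts.1, counts.2 + 1))
      (a, b)
    = (a + ((chroms.filter (fun x => (true == cnGet x "paternal") && !(cnGet x "dead"))).length : Int),
       b + ((chroms.filter (fun x => (false == cnGet x "paternal") && !(cnGet x "dead"))).length : Int)) := by
  induction chroms generalizing a b with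
  | nil => simp
  | cons h t ih =>
    by_cases hd : cnGet h "dead" <;> by_cases hp : cnGet h "paternal" <;>
      simp [hd, hp, List.filter, ih] <;> omega

lemma counts_eq (chroms : List (List (String × Bool))) :
    [true, false].map (fun paternal =>
        ((chroms.filter (fun x => (paternal == cnGet x "paternal") && !(cnGet x "dead"))).length : Int))
    = cnAltCounts chroms := by
  simp [cnAltCounts, cnAlt_fold]

-- A's lookup simulated_chromosomes[chrom_type] returns the pair's own value under Nodup keys
lemma lookup_self (sc : List (String × List (List (String × Bool))))
    (hnd : (sc.map Prod.fst).Nodup) (p : String × List (List (String × Bool))) (hp : p ∈ sc) :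
    (PySem.Dict.get? (PySem.Dict.mk sc) p.1).getD [] = p.2 := by
  have : PySem.Dict.get? (PySem.Dict.mk sc) p.1 = some p.2 := by
    apply PySem.Dict.get?_of_mem_items (v := p.2)
    · simpa [PySem.Dict.items] using hp
    · simpa [PySem.Dict.keys, PySem.Dict.items] using hnd
  simp [this]

lemma items_map_fold (sc : List (String × List (List (String × Bool))))
    (g : String × List (List (String × Bool)) → List Int)
    (hnd : (sc.map Prod.fst).Nodup) :
    (sc.foldl (fun (acc : PySem.Dict String (List Int)) p => acc.insert p.1 (g p))
        PySem.Dict.empty).items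
    = sc.map (fun p => (p.1, g p)) := by
  have := PySem.Dict.items_foldl_insert_fresh (l := sc) (k := Prod.fst) (v := g)
    (d := (PySem.Dict.empty : PySem.Dict String (List Int)))
    (by intro a _; simp) (by simpa using hnd)
  simpa [PySem.Dict.items] using this

-- ===== VERDICT (by name: the statement is the Claim_ definition above) =====
theorem count_copy_numbers_spec : Claim_equal_count_copy_numbers := by
  intro sc _ hpre
  obtain ⟨hnd, _⟩ := hpre
  unfold Spec_count_copy_numbers count_copy_numbers count_copy_numbers_alt
  rw [items_map_fold _ _ hnd, items_map_fold _ _ hnd]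
  apply List.map_congr_left
  intro p hp
  rw [lookup_self sc hnd p hp, counts_eq]
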